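-- pv_equiv track=rewrite | github.com/RazinHaisam/Diet_planner | tools/meal_plan.py | select_foods_for_macros
-- ===== SOURCE A (Python) =====
-- def select_foods_for_macros(foods: dict, target_protein: int, target_carbs: int, target_fats: int):
--     """Select foods that match target macros"""
--     selected = {
--         "breakfast": [],
--         "lunch": [],
--         "snack": [],
--         "dinner": []
--     }
--
--     # Group foods by meal type
--     breakfast_foods = [f for f, d in foods.items() if d.get("meal_type") == "breakfast"]
--     lunch_foods = [f for f, d in foods.items() if d.get("meal_type") == "lunch"]
--     snack_foods = [f for f, d in foods.items() if d.get("meal_type") == "snack"]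
--     dinner_foods = [f for f, d in foods.items() if d.get("meal_type") == "dinner"]
--
--     # Select foods for each meal (simple selection)
--     if breakfast_foods:
--         selected["breakfast"].append(breakfast_foods[0])
--     if lunch_foods:
--         selected["lunch"].append(lunch_foods[0])
--     if snack_foods:
--         selected["snack"].append(snack_foods[0])
--     if dinner_foods:
--         selected["dinner"].append(dinner_foods[0])
--
--     return selected
-- ===== SOURCE B (Python) =====
-- def select_foods_for_macros(foods: dict, target_protein: int, target_carbs: int, target_fats: int):
--     """Select foods that match target macros (single pass, first food per meal type wins)."""
--     selected = {
--         "breakfast": [],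
--         "lunch": [],
--         "snack": [],
--         "dinner": []
--     }
--     for f, d in foods.items():
--         mt = d.get("meal_type")
--         if mt in selected and not selected[mt]:
--             selected[mt].append(f)
--     return selected
-- ===== Notes on version B (the rewrite author's own statement) =====
-- stated objective: simpler
-- what changed: Replaces four separate list-comprehension scans plus four if-guards with one guarded pass over foods.items() that appends the first food of each meal type (first-wins).
import Mathlib
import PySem

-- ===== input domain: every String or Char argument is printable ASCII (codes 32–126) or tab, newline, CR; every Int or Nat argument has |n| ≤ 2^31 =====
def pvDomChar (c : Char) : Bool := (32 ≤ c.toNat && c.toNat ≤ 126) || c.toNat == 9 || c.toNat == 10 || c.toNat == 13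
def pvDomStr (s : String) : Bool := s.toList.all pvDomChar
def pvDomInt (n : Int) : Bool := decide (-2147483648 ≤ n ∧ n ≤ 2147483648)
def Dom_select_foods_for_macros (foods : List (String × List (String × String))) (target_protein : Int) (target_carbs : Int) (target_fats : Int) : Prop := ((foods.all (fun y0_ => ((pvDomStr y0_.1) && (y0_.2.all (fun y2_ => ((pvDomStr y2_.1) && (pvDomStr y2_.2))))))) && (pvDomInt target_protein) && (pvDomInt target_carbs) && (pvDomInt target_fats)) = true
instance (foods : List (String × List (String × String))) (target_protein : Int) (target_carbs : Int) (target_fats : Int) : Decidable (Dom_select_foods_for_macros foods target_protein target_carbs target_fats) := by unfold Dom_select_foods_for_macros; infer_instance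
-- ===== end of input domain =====

-- B replaces A's four separate comprehension scans with one first-wins pass over the foods (objective: simpler).

-- ===== PORT A =====
-- `if xs: selected[k].append(xs[0])` : the final list for key k
def pvFirstList (xs : List String) : List String :=
  match xs with
  | [] => []
  | x :: _ => [x]

def select_foods_for_macros (foods : List (String × List (String × String))) (target_protein : Int) (target_carbs : Int) (target_fats : Int) : List (String × List String) :=
  let breakfast_foods := (foods.filter (fun fd => (PySem.Dict.mk fd.2).get? "meal_type" == some "breakfast")).map Prod.fst
  let lunch_foods := (foods.filter (fun fd => (PySem.Dict.mk fd.2).get? "meal_type" == some "lunch")).map Prod.fst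
  let snack_foods := (foods.filter (fun fd => (PySem.Dict.mk fd.2).get? "meal_type" == some "snack")).map Prod.fst
  let dinner_foods := (foods.filter (fun fd => (PySem.Dict.mk fd.2).get? "meal_type" == some "dinner")).map Prod.fst
  [("breakfast", pvFirstList breakfast_foods),
   ("lunch", pvFirstList lunch_foods),
   ("snack", pvFirstList snack_foods),
   ("dinner", pvFirstList dinner_foods)]

-- ===== PORT B =====
-- one loop step: `mt = d.get("meal_type"); if mt in selected and not selected[mt]: selected[mt].append(f)`
def pvAltStep (sel : List String × List String × List String × List String)
    (fd : String × List (String × String)) : List String × List String × List String × List String :=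
  let (b, l, s, d) := sel
  match (PySem.Dict.mk fd.2).get? "meal_type" with
  | none => (b, l, s, d)
  | some mt =>
    if mt = "breakfast" then (if b = [] then ([fd.1], l, s, d) else (b, l, s, d))
    else if mt = "lunch" then (if l = [] then (b, [fd.1], s, d) else (b, l, s, d))
    else if mt = "snack" then (if s = [] then (b, l, [fd.1], d) else (b, l, s, d))
    else if mt = "dinner" then (if d = [] then (b, l, s, [fd.1]) else (b, l, s, d))
    else (b, l, s, d)

def select_foods_for_macros_alt (foods : List (String × List (String × String))) (target_protein : Int) (target_carbs : Int) (target_fats : Int) : List (String × List String) :=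
  let st := foods.foldl pvAltStep ([], [], [], [])
  [("breakfast", st.1), ("lunch", st.2.1), ("snack", st.2.2.1), ("dinner", st.2.2.2)]

-- ===== PRECONDITION & SPEC =====
def Spec_select_foods_for_macros (foods : List (String × List (String × String))) (target_protein : Int) (target_carbs : Int) (target_fats : Int) (out : List (String × List String)) : Prop := out = select_foods_for_macros_alt foods target_protein target_carbs target_fats
instance (foods : List (String × List (String × String))) (target_protein : Int) (target_carbs : Int) (target_fats : Int) (out : List (String × List String)) : Decidable (Spec_select_foods_for_macros foods target_protein target_carbs target_fats out) := by unfold Spec_select_foods_for_macros; infer_instance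

-- ===== CLAIM (what is proved, stated in full; the proofs are below) =====
def Claim_equal_select_foods_for_macros : Prop := ∀ (foods : List (String × List (String × String))) (target_protein : Int) (target_carbs : Int) (target_fats : Int), Dom_select_foods_for_macros foods target_protein target_carbs target_fats → Spec_select_foods_for_macros foods target_protein target_carbs target_fats (select_foods_for_macros foods target_protein target_carbs target_fats)

-- ===== LEMMAS AND PROOFS =====
-- "first match wins" characterisation of each component of the fold
def pvPick (cur : List String) (tag : String) (foods : List (String × List (String × String))) : List String :=
  if cur = [] then
    pvFirstList ((foods.filter (fun fd => (PySem.Dict.mk fd.2).get? "meal_type" == some tag)).map Prod.fst)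
  else cur

theorem pvFold_char (foods : List (String × List (String × String)))
    (b l s d : List String) :
    foods.foldl pvAltStep (b, l, s, d) =
      (pvPick b "breakfast" foods, pvPick l "lunch" foods,
       pvPick s "snack" foods, pvPick d "dinner" foods) := by
  induction foods generalizing b l s d with
  | nil => simp [pvPick, pvFirstList]
  | cons fd rest ih =>
    simp only [List.foldl_cons, pvAltStep]
    cases hmt : (PySem.Dict.mk fd.2).get? "meal_type" with
    | none =>
      simp only [ih]
      simp [pvPick, hmt]
    | some mt =>
      by_cases hb : mt = "breakfast"
      · subst hb
        by_cases hbe : b = [] <;>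
          · simp only [hbe, if_pos, ih] <;>
            simp [pvPick, hmt, hbe, pvFirstList]
      · by_cases hl : mt = "lunch"
        · subst hl
          by_cases hle : l = [] <;>
            · simp only [if_neg hb, hle, ih] <;>
              simp [pvPick, hmt, hle, pvFirstList]
        · by_cases hs : mt = "snack"
          · subst hs
            by_cases hse : s = [] <;>
              · simp only [if_neg hb, if_neg hl, hse, ih] <;>
                simp [pvPick, hmt, hse, pvFirstList]
          · by_cases hd : mt = "dinner"
            · subst hd
              by_cases hde : d = [] <;>
                · simp only [if_neg hb, if_neg hl, if_neg hs, hde, ih] <;>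
                  simp [pvPick, hmt, hde, pvFirstList]
            · simp only [if_neg hb, if_neg hl, if_neg hs, if_neg hd, ih]
              simp [pvPick, hmt, hb, hl, hs, hd]

-- ===== VERDICT (by name: the statement is the Claim_ definition above) =====
theorem select_foods_for_macros_spec : Claim_equal_select_foods_for_macros := by
  intro foods tp tc tf _
  unfold Spec_select_foods_for_macros select_foods_for_macros select_foods_for_macros_alt
  rw [pvFold_char]
  simp [pvPick]
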